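-- pv_equiv track=rewrite | github.com/GolzitskyNikolay/SPEAC-analysis | speac_library/speac/speac_analysis.py | break_event
-- ===== SOURCE A (Python) =====
-- def break_event(beat, event):
--     ontime = event[0]
--     duration = event[2]
--     result = []
--
--     while duration != 0:
--         local_result = [ontime, event[1]]
--
--         if duration > beat:
--             local_result.append(beat)
--             duration -= beat
--         else:
--             local_result.append(duration)
--             duration -= duration
--
--         local_result.append(event[3])
--         local_result.append(event[4])
--         result.append(local_result)
--
--         ontime += beat
--     return result
-- ===== SOURCE B (Python) =====
-- def break_event(beat, event):
--     duration = event[2]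
--     if duration == 0:
--         return []
--     if duration <= beat:
--         return [[event[0], event[1], duration, event[3], event[4]]]
--     k = (duration - 1) // beat  # number of full beat-sized chunks (beat > 0 here, else A never terminates)
--     rem = duration - k * beat
--     return [[event[0] + i * beat, event[1], beat, event[3], event[4]] for i in range(k)] + \
--            [[event[0] + k * beat, event[1], rem, event[3], event[4]]]
-- ===== Notes on version B (the rewrite author's own statement) =====
-- stated objective: simpler
-- what changed: Replaces A's destructive while-loop (mutating ontime/duration/result each iteration) by a closed form: the number of full beat chunks k = (duration-1)//beat is computed once and the result is built as a comprehension over range(k) plus one remainder chunk.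
import Mathlib
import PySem

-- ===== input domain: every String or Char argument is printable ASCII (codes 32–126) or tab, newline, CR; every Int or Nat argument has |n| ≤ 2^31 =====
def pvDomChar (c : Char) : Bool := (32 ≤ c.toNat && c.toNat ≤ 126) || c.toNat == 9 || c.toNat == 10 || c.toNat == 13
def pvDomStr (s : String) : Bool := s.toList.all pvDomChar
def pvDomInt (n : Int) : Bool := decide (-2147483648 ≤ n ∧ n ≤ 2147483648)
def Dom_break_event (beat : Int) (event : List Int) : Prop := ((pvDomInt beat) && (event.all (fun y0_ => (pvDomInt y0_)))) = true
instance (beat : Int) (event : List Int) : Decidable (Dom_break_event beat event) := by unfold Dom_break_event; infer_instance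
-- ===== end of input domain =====

-- B replaces A's stateful while-loop by a closed-form chunk count and a comprehension (objective: simpler).

-- ===== PORT A =====
-- A's while-loop; the fuel only makes the recursion total (under Pre_ it exceeds the
-- number of iterations A performs, so the port computes exactly A's loop).
def breakLoop (fuel : Nat) (beat e1 e3 e4 ontime duration : Int) (result : List (List Int)) : List (List Int) :=
  match fuel with
  | 0 => result
  | f + 1 =>
    if duration ≠ 0 then
      if duration > beat then
        breakLoop f beat e1 e3 e4 (ontime + beat) (duration - beat) (result ++ [[ontime, e1, beat, e3, e4]])
      else
        breakLoop f beat e1 e3 e4 (ontime + beat) (duration - duration) (result ++ [[ontime, e1, duration, e3, e4]])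
    else result

def break_event (beat : Int) (event : List Int) : List (List Int) :=
  let ontime := event.getD 0 0
  let duration := event.getD 2 0
  breakLoop (duration.natAbs + 1) beat (event.getD 1 0) (event.getD 3 0) (event.getD 4 0) ontime duration []

-- ===== PORT B =====
def break_event_alt (beat : Int) (event : List Int) : List (List Int) :=
  let duration := event.getD 2 0
  if duration = 0 then []
  else if duration ≤ beat then [[event.getD 0 0, event.getD 1 0, duration, event.getD 3 0, event.getD 4 0]]
  else
    let k := PySem.Int.floordiv (duration - 1) beat
    let rem := duration - k * beat
    (PySem.List.pyRange 0 k 1).map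
        (fun i => [event.getD 0 0 + i * beat, event.getD 1 0, beat, event.getD 3 0, event.getD 4 0])
      ++ [[event.getD 0 0 + k * beat, event.getD 1 0, rem, event.getD 3 0, event.getD 4 0]]

-- ===== PRECONDITION & SPEC =====
-- Pre_ excludes the inputs on which A raises IndexError (event shorter than the indices it
-- reads: length < 3 always, length < 5 when the duration is nonzero) and those on which A's
-- while-loop never terminates (duration > beat with beat ≤ 0). It excludes no input on which
-- A returns a value.
def Pre_break_event (beat : Int) (event : List Int) : Prop :=
  3 ≤ event.length ∧
    (event.getD 2 0 ≠ 0 → 5 ≤ event.length ∧ (beat < event.getD 2 0 → 0 < beat))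
instance (beat : Int) (event : List Int) : Decidable (Pre_break_event beat event) := by
  unfold Pre_break_event; infer_instance

def pvWitness_break_event : Int × List Int := (2, [0, 60, 5, 0, 90])

def Spec_break_event (beat : Int) (event : List Int) (out : List (List Int)) : Prop := out = break_event_alt beat event
instance (beat : Int) (event : List Int) (out : List (List Int)) : Decidable (Spec_break_event beat event out) := by unfold Spec_break_event; infer_instance

-- ===== CLAIM (what is proved, stated in full; the proofs are below) =====
def Claim_equal_break_event : Prop := ∀ (beat : Int) (event : List Int), Dom_break_event beat event → Pre_break_event beat event → Spec_break_event beat event (break_event beat event)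

-- ===== LEMMAS AND PROOFS =====

-- Proof-only spec of the chunk list: n full chunks of `beat`, then the remainder chunk.
def chunks (beat e1 e3 e4 : Int) : Int → Int → Nat → List (List Int)
  | ontime, duration, 0 => [[ontime, e1, duration, e3, e4]]
  | ontime, duration, n + 1 =>
      [ontime, e1, beat, e3, e4] :: chunks beat e1 e3 e4 (ontime + beat) (duration - beat) n

def numFull (beat duration : Int) : Nat :=
  if beat < duration then (PySem.Int.floordiv (duration - 1) beat).toNat else 0

lemma loop_zero (fuel : Nat) (beat e1 e3 e4 ontime : Int) (result : List (List Int)) :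
    breakLoop fuel beat e1 e3 e4 ontime 0 result = result := by
  cases fuel <;> simp [breakLoop]

lemma numFull_rec (beat duration : Int) (hb : 0 < beat) (hlt : beat < duration) :
    numFull beat duration = numFull beat (duration - beat) + 1 := by
  unfold numFull
  rw [if_pos hlt]
  by_cases h2 : beat < duration - beat
  · rw [if_pos h2]
    have hq := (PySem.Int.floordiv_eq_iff_of_pos
      (a := duration - beat - 1) (b := beat)
      (q := PySem.Int.floordiv (duration - beat - 1) beat) hb).mp rfl
    set q := PySem.Int.floordiv (duration - beat - 1) beat with hqdef
    have hq0 : 0 ≤ q := by nlinarith [hq.1, hq.2]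
    have hstep : PySem.Int.floordiv (duration - 1) beat = q + 1 := by
      rw [PySem.Int.floordiv_eq_iff_of_pos hb]
      constructor <;> nlinarith [hq.1, hq.2]
    rw [hstep]; omega
  · rw [if_neg h2]
    have hone : PySem.Int.floordiv (duration - 1) beat = 1 := by
      rw [PySem.Int.floordiv_eq_iff_of_pos hb]
      constructor <;> nlinarith
    rw [hone]; rfl

lemma loopA : ∀ (fuel : Nat) (beat e1 e3 e4 ontime duration : Int) (acc : List (List Int)),
    duration ≠ 0 → (beat < duration → 0 < beat) → duration.natAbs ≤ fuel →
    breakLoop fuel beat e1 e3 e4 ontime duration acc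
      = acc ++ chunks beat e1 e3 e4 ontime duration (numFull beat duration) := by
  intro fuel
  induction fuel with
  | zero => intro beat e1 e3 e4 ontime duration acc hd _ hf; omega
  | succ f ih =>
    intro beat e1 e3 e4 ontime duration acc hd hb hf
    by_cases hlt : beat < duration
    · have hbpos : 0 < beat := hb hlt
      rw [numFull_rec beat duration hbpos hlt]
      simp only [breakLoop, if_pos hd, gt_iff_lt, if_pos hlt]
      rw [ih beat e1 e3 e4 (ontime + beat) (duration - beat) _ (by omega)
            (fun _ => hbpos) (by omega)]
      simp [chunks]
    · have hnf : numFull beat duration = 0 := by unfold numFull; rw [if_neg hlt]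
      rw [hnf]
      simp only [breakLoop, if_pos hd, gt_iff_lt, if_neg hlt, sub_self]
      rw [loop_zero]
      simp [chunks]

lemma chunks_eq (beat e1 e3 e4 : Int) :
    ∀ (n : Nat) (ontime duration : Int),
      chunks beat e1 e3 e4 ontime duration n
        = (List.range n).map (fun (i : Nat) => [ontime + (i : Int) * beat, e1, beat, e3, e4])
          ++ [[ontime + (n : Int) * beat, e1, duration - (n : Int) * beat, e3, e4]] := by
  intro n
  induction n with
  | zero => intro ontime duration; simp [chunks]
  | succ n ih =>
    intro ontime duration
    rw [chunks, ih, List.range_succ_eq_map]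
    simp only [List.map_cons, List.map_map, List.cons_append]
    congr 1
    · norm_num
    congr 1
    · apply List.map_congr_left
      intro i _
      simp only [Function.comp_apply]
      push_cast
      ring_nf
    · simp only [List.cons.injEq, and_true, true_and]
      constructor <;> (push_cast; ring)

-- ===== VERDICT (by name: the statement is the Claim_ definition above) =====
theorem break_event_spec : Claim_equal_break_event := by
  intro beat event hdom hpre
  unfold Spec_break_event
  by_cases h0 : event.getD 2 0 = 0
  · unfold break_event break_event_alt
    rw [h0, loop_zero]
    simp
  · have hb : beat < event.getD 2 0 → 0 < beat := fun h => (hpre.2 h0).2 h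
    unfold break_event break_event_alt
    rw [loopA _ _ _ _ _ _ _ _ h0 hb (by omega)]
    simp only [List.nil_append]
    rw [if_neg h0]
    by_cases hlt : beat < event.getD 2 0
    · have hbpos := hb hlt
      rw [if_neg (by omega : ¬ event.getD 2 0 ≤ beat)]
      have hq := (PySem.Int.floordiv_eq_iff_of_pos
        (a := event.getD 2 0 - 1) (b := beat)
        (q := PySem.Int.floordiv (event.getD 2 0 - 1) beat) hbpos).mp rfl
      set k := PySem.Int.floordiv (event.getD 2 0 - 1) beat with hkdef
      have hk0 : 0 ≤ k := by nlinarith [hq.1, hq.2]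
      have hkcast : ((k.toNat : Int)) = k := by omega
      unfold numFull
      rw [← hkdef, if_pos hlt, chunks_eq, PySem.List.pyRange_one, List.map_map]
      simp only [sub_zero]
      congr 1
      · apply List.map_congr_left
        intro i _
        simp only [Function.comp_apply, zero_add]
      · rw [hkcast]
    · rw [if_pos (by omega : event.getD 2 0 ≤ beat)]
      unfold numFull
      rw [if_neg hlt]
      rfl
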